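-- pv_equiv track=rewrite | github.com/vibeforge1111/spark-intelligence-builder | src/spark_intelligence/observability/store.py | _derive_watchtower_top_level_state
-- ===== SOURCE A (Python) =====
-- from typing import Any
--
-- def _derive_watchtower_top_level_state(dimensions: dict[str, dict[str, Any]]) -> str:
--     states = {str(value.get("state") or "unknown") for value in dimensions.values()}
--     if "parity_broken" in states:
--         return "parity_broken"
--     if "stalled" in states:
--         return "stalled"
--     if "execution_impaired" in states:
--         return "execution_impaired"
--     if "delivery_impaired" in states:
--         return "delivery_impaired"
--     if "degraded" in states:
--         return "degraded"
--     return "healthy" if "healthy" in states else "unknown"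
-- ===== SOURCE B (Python) =====
-- _PRIORITY = {
--     "parity_broken": 0,
--     "stalled": 1,
--     "execution_impaired": 2,
--     "delivery_impaired": 3,
--     "degraded": 4,
--     "healthy": 5,
-- }
--
-- def _derive_watchtower_top_level_state(dimensions):
--     best_rank = len(_PRIORITY)
--     best_state = "unknown"
--     for value in dimensions.values():
--         key = str(value.get("state") or "unknown")
--         rank = _PRIORITY.get(key)
--         if rank is not None and rank < best_rank:
--             best_rank = rank
--             best_state = key
--     return best_state
-- ===== Notes on version B (the rewrite author's own statement) =====
-- stated objective: simpler
-- what changed: Replaces building a set of states plus six sequential membership checks with a single pass that tracks the minimum-priority state via a rank table, returning the tracked state (or 'unknown') at the end.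
import Mathlib
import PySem

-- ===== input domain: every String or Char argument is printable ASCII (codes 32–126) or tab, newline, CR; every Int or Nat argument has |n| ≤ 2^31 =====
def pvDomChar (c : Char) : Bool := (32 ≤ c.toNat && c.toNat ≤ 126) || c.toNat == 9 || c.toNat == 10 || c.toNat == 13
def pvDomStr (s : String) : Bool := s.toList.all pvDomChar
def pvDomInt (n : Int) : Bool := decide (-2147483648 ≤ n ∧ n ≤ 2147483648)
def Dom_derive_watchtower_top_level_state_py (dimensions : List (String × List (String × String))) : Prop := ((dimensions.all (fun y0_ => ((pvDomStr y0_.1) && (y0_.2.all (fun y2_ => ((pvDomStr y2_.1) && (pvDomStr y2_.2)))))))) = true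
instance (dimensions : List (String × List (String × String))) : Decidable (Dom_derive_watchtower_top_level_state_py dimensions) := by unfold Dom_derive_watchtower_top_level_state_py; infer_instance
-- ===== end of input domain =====

-- B replaces A's set-of-states + six membership checks by one min-priority scan (simpler decomposition, same O(n) cost).

-- shared helper: the Python expression str(value.get("state") or "unknown"), identical in A and B
def pvKeyOf (v : List (String × String)) : String :=
  match (PySem.Dict.mk v).get? "state" with
  | some s => if s = "" then "unknown" else s
  | none => "unknown"

-- ===== PORT A =====
def derive_watchtower_top_level_state_py (dimensions : List (String × List (String × String))) : String :=
  let states : PySem.Set String := PySem.Set.ofList (dimensions.map (fun kv => pvKeyOf kv.2))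
  if PySem.Set.contains states "parity_broken" then "parity_broken"
  else if PySem.Set.contains states "stalled" then "stalled"
  else if PySem.Set.contains states "execution_impaired" then "execution_impaired"
  else if PySem.Set.contains states "delivery_impaired" then "delivery_impaired"
  else if PySem.Set.contains states "degraded" then "degraded"
  else if PySem.Set.contains states "healthy" then "healthy" else "unknown"

-- ===== PORT B =====
def pvPriority : PySem.Dict String Nat :=
  PySem.Dict.mk [("parity_broken", 0), ("stalled", 1), ("execution_impaired", 2),
                 ("delivery_impaired", 3), ("degraded", 4), ("healthy", 5)]

def derive_watchtower_top_level_state_py_alt (dimensions : List (String × List (String × String))) : String :=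
  let r := dimensions.foldl (fun acc kv =>
    let key := pvKeyOf kv.2
    match pvPriority.get? key with
    | some rank => if rank < acc.1 then (rank, key) else acc
    | none => acc) ((6 : Nat), "unknown")
  r.2

-- ===== PRECONDITION & SPEC =====
def Spec_derive_watchtower_top_level_state_py (dimensions : List (String × List (String × String))) (out : String) : Prop := out = derive_watchtower_top_level_state_py_alt dimensions
instance (dimensions : List (String × List (String × String))) (out : String) : Decidable (Spec_derive_watchtower_top_level_state_py dimensions out) := by unfold Spec_derive_watchtower_top_level_state_py; infer_instance

-- ===== CLAIM (what is proved, stated in full; the proofs are below) =====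
def Claim_equal_derive_watchtower_top_level_state_py : Prop := ∀ (dimensions : List (String × List (String × String))), Dom_derive_watchtower_top_level_state_py dimensions → Spec_derive_watchtower_top_level_state_py dimensions (derive_watchtower_top_level_state_py dimensions)

-- ===== LEMMAS AND PROOFS =====

-- rank of a state string (6 = unranked), and the state name of a rank
def pvRk (k : String) : Nat := (pvPriority.get? k).getD 6

def pvNameOf : Nat → String
  | 0 => "parity_broken"
  | 1 => "stalled"
  | 2 => "execution_impaired"
  | 3 => "delivery_impaired"
  | 4 => "degraded"
  | 5 => "healthy"
  | _ => "unknown"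

-- minimum rank over a list of state strings
def pvMinRank : List String → Nat
  | [] => 6
  | k :: ks => min (pvRk k) (pvMinRank ks)

theorem pvName_of_get (k : String) (r : Nat) (h : pvPriority.get? k = some r) : k = pvNameOf r := by
  simp only [pvPriority, PySem.Dict.get?_mk_cons] at h
  split_ifs at h with h1 h2 h3 h4 h5 h6
  · injection h with h; subst h; exact (eq_of_beq h1).symm
  · injection h with h; subst h; exact (eq_of_beq h2).symm
  · injection h with h; subst h; exact (eq_of_beq h3).symm
  · injection h with h; subst h; exact (eq_of_beq h4).symm
  · injection h with h; subst h; exact (eq_of_beq h5).symm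
  · injection h with h; subst h; exact (eq_of_beq h6).symm
  · simp [PySem.Dict.get?] at h

theorem pvRk_le_five_name (k : String) (h : pvRk k ≤ 5) : k = pvNameOf (pvRk k) := by
  unfold pvRk at *
  cases hg : pvPriority.get? k with
  | none => simp [hg] at h
  | some r => simpa [hg] using pvName_of_get k r hg

theorem pvMinRank_le_six (ks : List String) : pvMinRank ks ≤ 6 := by
  induction ks with
  | nil => simp [pvMinRank]
  | cons k ks ih => simp [pvMinRank]; omega

theorem pvMinRank_le_of_mem {x : String} {ks : List String} (h : x ∈ ks) :
    pvMinRank ks ≤ pvRk x := by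
  induction ks with
  | nil => cases h
  | cons k ks ih =>
    rcases List.mem_cons.mp h with rfl | h
    · simp [pvMinRank]
    · have := ih h; simp [pvMinRank]; omega

theorem pvMinRank_achieved {ks : List String} (h : pvMinRank ks ≤ 5) :
    pvNameOf (pvMinRank ks) ∈ ks := by
  induction ks with
  | nil => simp [pvMinRank] at h
  | cons k ks ih =>
    simp only [pvMinRank] at h ⊢
    by_cases hle : pvRk k ≤ pvMinRank ks
    · rw [min_eq_left hle]
      have : k = pvNameOf (pvRk k) := pvRk_le_five_name k (by omega)
      exact this ▸ List.mem_cons_self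
    · rw [min_eq_right (by omega)]
      exact List.mem_cons_of_mem _ (ih (by omega))

-- B's fold tracks (min rank so far, its state name)
theorem pvFold_invariant (dims : List (String × List (String × String))) (br : Nat)
    (hbr : br ≤ 6) :
    dims.foldl (fun acc kv =>
      let key := pvKeyOf kv.2
      match pvPriority.get? key with
      | some rank => if rank < acc.1 then (rank, key) else acc
      | none => acc) (br, pvNameOf br)
    = (min br (pvMinRank (dims.map (fun kv => pvKeyOf kv.2))),
       pvNameOf (min br (pvMinRank (dims.map (fun kv => pvKeyOf kv.2))))) := by
  induction dims generalizing br with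
  | nil => simp [pvMinRank, Nat.min_eq_left hbr]
  | cons kv dims ih =>
    simp only [List.foldl_cons, List.map_cons, pvMinRank]
    have hstep :
        (match pvPriority.get? (pvKeyOf kv.2) with
          | some rank => if rank < br then (rank, pvKeyOf kv.2) else (br, pvNameOf br)
          | none => (br, pvNameOf br))
        = (min br (pvRk (pvKeyOf kv.2)), pvNameOf (min br (pvRk (pvKeyOf kv.2)))) := by
      cases hg : pvPriority.get? (pvKeyOf kv.2) with
      | none => simp [pvRk, hg, Nat.min_eq_left hbr]
      | some r =>
        have hname := pvName_of_get _ r hg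
        have hr5 : r ≤ 5 := by
          simp only [pvPriority, PySem.Dict.get?_mk_cons] at hg
          split_ifs at hg <;>
            first
              | (injection hg with hg; omega)
              | simp [PySem.Dict.get?] at hg
        by_cases hlt : r < br
        · simp [pvRk, hg, hlt, Nat.min_eq_right (le_of_lt hlt), ← hname]
        · simp [pvRk, hg, hlt, Nat.min_eq_left (by omega : br ≤ r)]
    rw [hstep, ih _ (by simp; omega)]
    congr 1 <;> rw [min_assoc]

theorem pvAlt_eq (dims : List (String × List (String × String))) :
    derive_watchtower_top_level_state_py_alt dims
      = pvNameOf (pvMinRank (dims.map (fun kv => pvKeyOf kv.2))) := by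
  have h := pvFold_invariant dims 6 (le_refl 6)
  have h2 : derive_watchtower_top_level_state_py_alt dims
      = (dims.foldl (fun acc kv =>
          let key := pvKeyOf kv.2
          match pvPriority.get? key with
          | some rank => if rank < acc.1 then (rank, key) else acc
          | none => acc) ((6 : Nat), pvNameOf 6)).2 := rfl
  rw [h2, h, Nat.min_eq_right (pvMinRank_le_six _)]

theorem pvA_eq (dims : List (String × List (String × String))) :
    derive_watchtower_top_level_state_py dims
      = pvNameOf (pvMinRank (dims.map (fun kv => pvKeyOf kv.2))) := by
  unfold derive_watchtower_top_level_state_py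
  set ks := dims.map (fun kv => pvKeyOf kv.2) with hks
  have hmem : ∀ x, ((PySem.Set.ofList ks).contains x = true) ↔ x ∈ ks := by
    intro x
    rw [PySem.Set.contains_iff, PySem.Set.mem_ofList]
  have hle6 := pvMinRank_le_six ks
  have hrk : pvRk "parity_broken" = 0 ∧ pvRk "stalled" = 1 ∧ pvRk "execution_impaired" = 2 ∧
      pvRk "delivery_impaired" = 3 ∧ pvRk "degraded" = 4 ∧ pvRk "healthy" = 5 := by decide
  obtain ⟨h0, h1, h2, h3, h4, h5⟩ := hrk
  simp only [hmem]
  have hmin : ∀ (n : Nat), n ≤ 5 → pvMinRank ks = n →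
      pvNameOf n ∈ ks := by
    intro n hn he
    have := pvMinRank_achieved (ks := ks) (by omega)
    rwa [he] at this
  by_cases c0 : "parity_broken" ∈ ks
  · have := pvMinRank_le_of_mem c0
    have hm : pvMinRank ks = 0 := by omega
    rw [if_pos c0, hm]; rfl
  · rw [if_neg c0]
    by_cases c1 : "stalled" ∈ ks
    · have := pvMinRank_le_of_mem c1
      have hm : pvMinRank ks = 1 := by
        by_contra hne
        exact c0 (hmin 0 (by omega) (by omega))
      rw [if_pos c1, hm]; rfl
    · rw [if_neg c1]
      by_cases c2 : "execution_impaired" ∈ ks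
      · have := pvMinRank_le_of_mem c2
        have hm : pvMinRank ks = 2 := by
          rcases Nat.lt_or_ge (pvMinRank ks) 2 with hlt | hge
          · exfalso
            interval_cases hv : pvMinRank ks
            · exact c0 (hmin 0 (by omega) (by omega))
            · exact c1 (hmin 1 (by omega) (by omega))
          · omega
        rw [if_pos c2, hm]; rfl
      · rw [if_neg c2]
        by_cases c3 : "delivery_impaired" ∈ ks
        · have := pvMinRank_le_of_mem c3
          have hm : pvMinRank ks = 3 := by
            rcases Nat.lt_or_ge (pvMinRank ks) 3 with hlt | hge
            · exfalso
              interval_cases hv : pvMinRank ks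
              · exact c0 (hmin 0 (by omega) (by omega))
              · exact c1 (hmin 1 (by omega) (by omega))
              · exact c2 (hmin 2 (by omega) (by omega))
            · omega
          rw [if_pos c3, hm]; rfl
        · rw [if_neg c3]
          by_cases c4 : "degraded" ∈ ks
          · have := pvMinRank_le_of_mem c4
            have hm : pvMinRank ks = 4 := by
              rcases Nat.lt_or_ge (pvMinRank ks) 4 with hlt | hge
              · exfalso
                interval_cases hv : pvMinRank ks
                · exact c0 (hmin 0 (by omega) (by omega))
                · exact c1 (hmin 1 (by omega) (by omega))
                · exact c2 (hmin 2 (by omega) (by omega))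
                · exact c3 (hmin 3 (by omega) (by omega))
              · omega
            rw [if_pos c4, hm]; rfl
          · rw [if_neg c4]
            by_cases c5 : "healthy" ∈ ks
            · have := pvMinRank_le_of_mem c5
              have hm : pvMinRank ks = 5 := by
                rcases Nat.lt_or_ge (pvMinRank ks) 5 with hlt | hge
                · exfalso
                  interval_cases hv : pvMinRank ks
                  · exact c0 (hmin 0 (by omega) (by omega))
                  · exact c1 (hmin 1 (by omega) (by omega))
                  · exact c2 (hmin 2 (by omega) (by omega))
                  · exact c3 (hmin 3 (by omega) (by omega))
                  · exact c4 (hmin 4 (by omega) (by omega))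
                · omega
              rw [if_pos c5, hm]; rfl
            · rw [if_neg c5]
              have hm : pvMinRank ks = 6 := by
                rcases Nat.lt_or_ge (pvMinRank ks) 6 with hlt | hge
                · exfalso
                  interval_cases hv : pvMinRank ks
                  · exact c0 (hmin 0 (by omega) (by omega))
                  · exact c1 (hmin 1 (by omega) (by omega))
                  · exact c2 (hmin 2 (by omega) (by omega))
                  · exact c3 (hmin 3 (by omega) (by omega))
                  · exact c4 (hmin 4 (by omega) (by omega))
                  · exact c5 (hmin 5 (by omega) (by omega))
                · omega
              rw [hm]; rfl

-- ===== VERDICT (by name: the statement is the Claim_ definition above) =====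
theorem derive_watchtower_top_level_state_py_spec : Claim_equal_derive_watchtower_top_level_state_py := by
  intro dims _
  unfold Spec_derive_watchtower_top_level_state_py
  rw [pvA_eq, pvAlt_eq]
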